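-- pv_equiv track=rewrite | github.com/yuenliou/leetcode | lcof/38-zi-fu-chuan-de-pai-lie-lcof.py | permutation1
-- ===== SOURCE A (Python) =====
-- from typing import List
--
-- def permutation1(s: str) -> List[str]:
--     """
--     思路：dfs回溯，剪枝：1，排序去重i vs i-1，2，每位对应一个set
--     """
--     def dfs(depth, path):
--         #边界条件：
--         if len(path) == len(s): return ans.append(''.join(path))
--
--         for j in range(len(s)):
--             # 排序去重：not used[i - 1]保证每次都是拿从左往右第一个未被填过的数字
--             if j > 0 and s[j] == s[j - 1] and not visited[j - 1]: continue
--
--             if visited[j]: continue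
--
--             # 状态标记
--             visited[j] = 1
--             path.append(s[j])
--
--             dfs(depth+1, path)
--
--             # 状态恢复
--             visited[j] = 0
--             path.pop()
--
--     #答案数组
--     ans = []
--     #状态数组
--     visited = [0] * len(s)
--     #排序
--     s = "".join((lambda x: (x.sort(), x)[1])(list(s)))
--     # s = "".join(sorted(s, key=str.lower))
--     #遍历字符串
--     dfs(0, [])
--     return ans
-- ===== SOURCE B (Python) =====
-- from typing import List
--
-- def permutation1(s: str) -> List[str]:
--     # Iterative breadth-first level construction: no recursion, no visited array,
--     # no backtracking. `level` holds every valid k-length prefix in lexicographic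
--     # order; extending each prefix by the sorted distinct characters that still
--     # have occurrences left keeps the order and never creates duplicates.
--     keys = sorted(set(s))
--     need = {c: s.count(c) for c in keys}
--     level = ['']
--     for _ in range(len(s)):
--         level = [p + c for p in level for c in keys if p.count(c) < need[c]]
--     return level
-- ===== Notes on version B (the rewrite author's own statement) =====
-- stated objective: alternative
-- what changed: Replaces A's recursive backtracking (sorted string, visited array, previous-sibling duplicate-skip) by an iterative breadth-first construction: a frequency table of the distinct sorted characters, and n passes of a list comprehension that extends every valid prefix by each character that still has occurrences left.
import Mathlib
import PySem

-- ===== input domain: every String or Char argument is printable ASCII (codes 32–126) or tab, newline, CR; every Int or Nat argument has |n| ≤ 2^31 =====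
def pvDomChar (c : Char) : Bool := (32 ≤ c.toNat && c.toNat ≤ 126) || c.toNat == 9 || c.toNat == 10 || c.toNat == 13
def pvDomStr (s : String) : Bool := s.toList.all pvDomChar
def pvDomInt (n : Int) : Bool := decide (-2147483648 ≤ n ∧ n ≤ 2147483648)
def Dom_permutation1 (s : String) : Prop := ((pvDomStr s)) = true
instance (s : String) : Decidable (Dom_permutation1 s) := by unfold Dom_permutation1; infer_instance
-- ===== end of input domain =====

-- B replaces A's recursive backtracking (sorted string + visited array + previous-sibling
-- duplicate skip) by an iterative breadth-first level construction over a frequency table.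

-- ===== PORT A =====
-- A's recursive dfs: fuel only makes the recursion total (it is always sufficient:
-- each level appends one character to path, so depth is bounded by len(s)+1);
-- indexing t.getD j ' ' is exact because j ∈ range(len(t)) (and j-1 after j > 0) is in range.
mutual
def pvDfsA (t : List Char) (fuel : Nat) (visited : List Int) (path : List Char) (ans : List String) : List String :=
  match fuel with
  | 0 => ans
  | f + 1 =>
    if path.length = t.length then ans ++ [String.ofList path]
    else pvLoopA t f visited path (List.range t.length) ans
  termination_by (fuel, 0, 0)

def pvLoopA (t : List Char) (f : Nat) (visited : List Int) (path : List Char) (js : List Nat) (ans : List String) : List String :=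
  match js with
  | [] => ans
  | j :: rest =>
    pvLoopA t f visited path rest
      (if 0 < j ∧ t.getD j ' ' = t.getD (j - 1) ' ' ∧ visited.getD (j - 1) 0 = 0 then ans
       else if visited.getD j 0 ≠ 0 then ans
       else pvDfsA t f (visited.set j 1) (path ++ [t.getD j ' ']) ans)
  termination_by (f, 1, js.length)
end

def permutation1 (s : String) : List String :=
  -- visited = [0] * len(s); s = "".join(sorted chars); dfs(0, [])
  let visited := List.replicate s.toList.length (0 : Int)
  let t := PySem.List.sorted s.toList (fun c => c) false
  pvDfsA t (t.length + 1) visited [] []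

-- ===== PORT B =====
-- one pass of B's list comprehension: extend every prefix by each still-available key
-- (need[c] in the Python never raises: every c drawn from keys is a key of need, so getD is exact)
def pvStep (keys : List Char) (need : PySem.Dict Char Int) (level : List (List Char)) : List (List Char) :=
  level.flatMap (fun p => (keys.filter (fun c => ((p.count c : Int)) < need.getD c 0)).map (fun c => p ++ [c]))

def permutation1_alt (s : String) : List String :=
  -- keys = sorted(set(s)); need = {c: s.count(c) for c in keys}; n iterations of the level comprehension;
  -- the growing Python strings are modelled as their character lists, joined at the end (value-exact)
  let keys := PySem.List.sorted (PySem.Set.ofList s.toList) (fun c => c) false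
  let need := keys.foldl (fun d c => d.insert c ((s.toList.count c : Int))) PySem.Dict.empty
  ((List.range s.toList.length).foldl (fun lv _ => pvStep keys need lv) [[]]).map String.ofList

-- ===== PRECONDITION & SPEC =====
def Spec_permutation1 (s : String) (out : List String) : Prop := out = permutation1_alt s
instance (s : String) (out : List String) : Decidable (Spec_permutation1 s out) := by unfold Spec_permutation1; infer_instance

-- ===== CLAIM (what is proved, stated in full; the proofs are below) =====
def Claim_equal_permutation1 : Prop := ∀ (s : String), Dom_permutation1 s → Spec_permutation1 s (permutation1 s)

-- ===== LEMMAS AND PROOFS =====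

-- Proof-side intermediate: a counter-indexed DFS. A is proved equal to it (pvMain),
-- and B's breadth-first levels are proved equal to it too (pvDfsB_eq_comp + pvLevels).
mutual
def pvDfsB (n : Nat) (keys : List Char) (fuel : Nat) (cnt : PySem.Dict Char Int) (path : List Char) (ans : List String) : List String :=
  match fuel with
  | 0 => ans
  | f + 1 =>
    if path.length = n then ans ++ [String.ofList path]
    else pvLoopB n keys f cnt path keys ans
  termination_by (fuel, 0, 0)

def pvLoopB (n : Nat) (keys : List Char) (f : Nat) (cnt : PySem.Dict Char Int) (path : List Char) (ks : List Char) (ans : List String) : List String :=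
  match ks with
  | [] => ans
  | c :: rest =>
    pvLoopB n keys f cnt path rest
      (if cnt.getD c 0 = 0 then ans
       else pvDfsB n keys f (cnt.insert c (cnt.getD c 0 - 1)) (path ++ [c]) ans)
  termination_by (f, 1, ks.length)
end

-- j survives A's two `continue`s
def pvSel (t : List Char) (visited : List Int) (j : Nat) : Bool :=
  !(decide (0 < j ∧ t.getD j ' ' = t.getD (j - 1) ' ' ∧ visited.getD (j - 1) 0 = 0)) &&
  decide (visited.getD j 0 = 0)

-- number of unvisited positions holding character c
def pvRem (t : List Char) (visited : List Int) (c : Char) : Nat :=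
  (List.range t.length).countP (fun j => decide (t.getD j ' ' = c) && decide (visited.getD j 0 = 0))

-- invariant: inside a block of equal characters, visited positions form a prefix
def pvOk (t : List Char) (visited : List Int) : Prop :=
  ∀ j, j + 1 < t.length → t.getD (j + 1) ' ' = t.getD j ' ' → visited.getD (j + 1) 0 ≠ 0 → visited.getD j 0 ≠ 0

lemma pvLoopA_eq_foldl (t : List Char) (f : Nat) (visited : List Int) (path : List Char) :
    ∀ (js : List Nat) (ans : List String),
      pvLoopA t f visited path js ans =
        (js.filter (pvSel t visited)).foldl
          (fun ans j => pvDfsA t f (visited.set j 1) (path ++ [t.getD j ' ']) ans) ans := by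
  intro js
  induction js with
  | nil => intro ans; simp [pvLoopA]
  | cons j rest ih =>
    intro ans
    rw [pvLoopA]
    by_cases h1 : 0 < j ∧ t.getD j ' ' = t.getD (j - 1) ' ' ∧ visited.getD (j - 1) 0 = 0
    · rw [if_pos h1, ih]
      have hsel : pvSel t visited j = false := by
        unfold pvSel; rw [decide_eq_true h1]; rfl
      simp [hsel]
    · rw [if_neg h1]
      by_cases h2 : visited.getD j 0 ≠ 0
      · rw [if_pos h2, ih]
        have hsel : pvSel t visited j = false := by
          unfold pvSel; rw [decide_eq_false (by omega : ¬ visited.getD j 0 = 0)]; simp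
        simp [hsel]
      · rw [if_neg h2, ih]
        have hsel : pvSel t visited j = true := by
          unfold pvSel; rw [decide_eq_false h1, decide_eq_true (by omega : visited.getD j 0 = 0)]; rfl
        simp [hsel]

lemma pvLoopB_eq_foldl (n : Nat) (keys : List Char) (f : Nat) (cnt : PySem.Dict Char Int) (path : List Char) :
    ∀ (ks : List Char) (ans : List String),
      pvLoopB n keys f cnt path ks ans =
        (ks.filter (fun c => !decide (cnt.getD c 0 = 0))).foldl
          (fun ans c => pvDfsB n keys f (cnt.insert c (cnt.getD c 0 - 1)) (path ++ [c]) ans) ans := by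
  intro ks
  induction ks with
  | nil => intro ans; simp [pvLoopB]
  | cons c rest ih =>
    intro ans
    rw [pvLoopB]
    by_cases h1 : cnt.getD c 0 = 0
    · rw [if_pos h1, ih]
      simp [h1]
    · rw [if_neg h1, ih]
      simp [h1]

lemma pvMono (t : List Char) (hs : t.Pairwise (· ≤ ·)) {i j : Nat} (hij : i ≤ j) (hj : j < t.length) :
    t.getD i ' ' ≤ t.getD j ' ' := by
  have hi : i < t.length := lt_of_le_of_lt hij hj
  rw [List.getD_eq_getElem?_getD, List.getD_eq_getElem?_getD,
    List.getElem?_eq_getElem hi, List.getElem?_eq_getElem hj]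
  rcases Nat.lt_or_ge i j with hlt | hge
  · exact (List.pairwise_iff_getElem.1 hs) i j hi hj hlt
  · have : i = j := by omega
    subst this; exact le_refl _

-- unvisitedness propagates to the right inside a block of equal characters
lemma pvChain (t : List Char) (visited : List Int) (hok : pvOk t visited)
    {i j : Nat} (hij : i ≤ j) (hj : j < t.length)
    (hchar : ∀ k, i ≤ k → k ≤ j → t.getD k ' ' = t.getD j ' ')
    (h0 : visited.getD i 0 = 0) : visited.getD j 0 = 0 := by
  have key : ∀ d, i + d ≤ j → visited.getD (i + d) 0 = 0 := by
    intro d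
    induction d with
    | zero => intro _; simpa using h0
    | succ d ihd =>
      intro hle
      have hprev := ihd (by omega)
      have hcc : t.getD (i + d + 1) ' ' = t.getD (i + d) ' ' := by
        rw [hchar (i + d + 1) (by omega) (by omega), hchar (i + d) (by omega) (by omega)]
      by_contra hne
      exact (hok (i + d) (by omega) hcc hne) hprev
  have := key (j - i) (by omega)
  simpa [Nat.add_sub_cancel' hij] using this

-- under the invariant, A selects exactly the first unvisited position of each character
lemma pvSel_char (t : List Char) (visited : List Int) (hs : t.Pairwise (· ≤ ·))
    (hok : pvOk t visited) {j : Nat} (hj : j < t.length) :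
    pvSel t visited j = true ↔
      visited.getD j 0 = 0 ∧ ∀ i < j, t.getD i ' ' = t.getD j ' ' → visited.getD i 0 ≠ 0 := by
  constructor
  · intro h
    unfold pvSel at h
    rw [Bool.and_eq_true, Bool.not_eq_eq_eq_not, Bool.not_true, decide_eq_false_iff_not,
      decide_eq_true_eq] at h
    have h' : ¬(0 < j ∧ t.getD j ' ' = t.getD (j - 1) ' ' ∧ visited.getD (j - 1) 0 = 0) ∧
        visited.getD j 0 = 0 := h
    refine ⟨h'.2, ?_⟩
    intro i hi hchar_i
    by_contra hiz
    have hi0 : visited.getD i 0 = 0 := by omega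
    have hall : ∀ k, i ≤ k → k ≤ j → t.getD k ' ' = t.getD j ' ' := by
      intro k hik hkj
      have h1 : t.getD k ' ' ≤ t.getD j ' ' := pvMono t hs hkj hj
      have h2 : t.getD i ' ' ≤ t.getD k ' ' := pvMono t hs hik (lt_of_le_of_lt hkj hj)
      rw [hchar_i] at h2
      exact le_antisymm h1 h2
    have hj1 : visited.getD (j - 1) 0 = 0 := by
      apply pvChain t visited hok (i := i) (j := j - 1) (by omega) (by omega) ?_ hi0
      intro k hik hkj
      rw [hall k hik (by omega), hall (j - 1) (by omega) (by omega)]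
    exact h'.1 ⟨by omega, (hall (j - 1) (by omega) (by omega)).symm, hj1⟩
  · rintro ⟨h0, hmin⟩
    have hnp : ¬(0 < j ∧ t.getD j ' ' = t.getD (j - 1) ' ' ∧ visited.getD (j - 1) 0 = 0) := by
      rintro ⟨hpos, hceq, hz⟩
      exact (hmin (j - 1) (by omega) hceq.symm) hz
    unfold pvSel
    rw [decide_eq_false hnp, decide_eq_true h0]
    rfl

lemma pvGetD_set (v : List Int) (j k : Nat) (hj : j < v.length) :
    (v.set j 1).getD k 0 = if k = j then 1 else v.getD k 0 := by
  rw [List.getD_eq_getElem?_getD, List.getD_eq_getElem?_getD, List.getElem?_set]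
  by_cases h : k = j
  · simp [h, hj]
  · have h' : j ≠ k := fun hh => h hh.symm
    rw [if_neg h, if_neg h']

lemma pvCountP_point (p q : Nat → Bool) (n j : Nat) (h : ∀ i, i ≠ j → p i = q i)
    (hj : j < n) (hpj : p j = true) (hqj : q j = false) :
    (List.range n).countP p = (List.range n).countP q + 1 := by
  induction n with
  | zero => exact absurd hj (by omega)
  | succ n ihn =>
    rw [List.range_succ, List.countP_append, List.countP_append]
    by_cases hjn : j = n
    · subst hjn
      have hcong : (List.range j).countP p = (List.range j).countP q := by
        apply List.countP_congr
        intro a ha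
        rw [h a (by have := List.mem_range.1 ha; omega)]
      simp [hcong, hpj, hqj]
    · have hlt : j < n := by omega
      have := ihn hlt
      have hn' : p n = q n := h n (by omega)
      simp only [List.countP_cons, List.countP_nil, hn']
      omega

-- the characters A recurses on, in order, are exactly the keys the counter-DFS recurses on
lemma pvKeyEq (t : List Char) (visited : List Int) (keys : List Char) (cnt : PySem.Dict Char Int)
    (hs : t.Pairwise (· ≤ ·)) (hok : pvOk t visited)
    (hkeys : keys.Pairwise (· < ·)) (hmemk : ∀ c, c ∈ keys ↔ c ∈ t)
    (hcnt : ∀ c ∈ keys, cnt.getD c 0 = (pvRem t visited c : Int)) :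
    ((List.range t.length).filter (pvSel t visited)).map (fun j => t.getD j ' ') =
      keys.filter (fun c => !decide (cnt.getD c 0 = 0)) := by
  have hLp : (((List.range t.length).filter (pvSel t visited)).map (fun j => t.getD j ' ')).Pairwise (· < ·) := by
    rw [List.pairwise_map]
    apply List.Pairwise.imp_of_mem (R := (· < ·)) ?_ ((List.pairwise_lt_range).filter _)
    intro a b ha hb hab
    have ha' := List.mem_filter.1 ha
    have hb' := List.mem_filter.1 hb
    have haj : a < t.length := List.mem_range.1 ha'.1
    have hbj : b < t.length := List.mem_range.1 hb'.1
    have hle : t.getD a ' ' ≤ t.getD b ' ' := pvMono t hs (le_of_lt hab) hbj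
    rcases lt_or_eq_of_le hle with h | h
    · exact h
    · exfalso
      have hca := (pvSel_char t visited hs hok haj).1 ha'.2
      have hcb := (pvSel_char t visited hs hok hbj).1 hb'.2
      exact (hcb.2 a hab h) hca.1
  have hRp : (keys.filter (fun c => !decide (cnt.getD c 0 = 0))).Pairwise (· < ·) := hkeys.filter _
  have hmem : ∀ c, c ∈ ((List.range t.length).filter (pvSel t visited)).map (fun j => t.getD j ' ') ↔
      c ∈ keys.filter (fun c => !decide (cnt.getD c 0 = 0)) := by
    intro c
    constructor
    · intro hc
      obtain ⟨j, hjf, hjc⟩ := List.mem_map.1 hc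
      have hjf' := List.mem_filter.1 hjf
      have hj : j < t.length := List.mem_range.1 hjf'.1
      have hch := (pvSel_char t visited hs hok hj).1 hjf'.2
      have hck : c ∈ keys := by
        rw [hmemk]
        have : t.getD j ' ' ∈ t := by
          rw [List.getD_eq_getElem?_getD, List.getElem?_eq_getElem hj]
          exact List.getElem_mem hj
        rwa [hjc] at this
      have hrem : 0 < pvRem t visited c := by
        apply List.countP_pos_iff.2
        refine ⟨j, List.mem_range.2 hj, ?_⟩
        rw [Bool.and_eq_true, decide_eq_true_eq, decide_eq_true_eq]
        exact ⟨hjc, hch.1⟩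
      rw [List.mem_filter]
      refine ⟨hck, ?_⟩
      rw [hcnt c hck]
      simp only [Bool.not_eq_eq_eq_not, Bool.not_true, decide_eq_false_iff_not]
      intro habs
      omega
    · intro hc
      have hc' := List.mem_filter.1 hc
      have hck := hc'.1
      have hnz : pvRem t visited c ≠ 0 := by
        intro habs
        have := hc'.2
        rw [hcnt c hck, habs] at this
        simp at this
      have hex' : ∃ j, j < t.length ∧ t.getD j ' ' = c ∧ visited.getD j 0 = 0 := by
        obtain ⟨j, hjr, hjp⟩ := List.countP_pos_iff.1 (Nat.pos_of_ne_zero hnz)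
        rw [Bool.and_eq_true, decide_eq_true_eq, decide_eq_true_eq] at hjp
        exact ⟨j, List.mem_range.1 hjr, hjp.1, hjp.2⟩
      set j0 := Nat.find hex' with hj0def
      obtain ⟨hj0l, hj0c, hj0z⟩ := Nat.find_spec hex'
      have hsel : pvSel t visited j0 = true := by
        rw [pvSel_char t visited hs hok hj0l]
        refine ⟨hj0z, ?_⟩
        intro i hi hic
        by_contra hiz
        have hi0 : visited.getD i 0 = 0 := by omega
        exact Nat.find_min hex' hi ⟨by omega, by rw [hic, hj0c], hi0⟩
      apply List.mem_map.2
      exact ⟨j0, List.mem_filter.2 ⟨List.mem_range.2 hj0l, hsel⟩, hj0c⟩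
  have hndL : (((List.range t.length).filter (pvSel t visited)).map (fun j => t.getD j ' ')).Nodup :=
    hLp.imp ne_of_lt
  have hndR : (keys.filter (fun c => !decide (cnt.getD c 0 = 0))).Nodup := hRp.imp ne_of_lt
  have hperm := (List.perm_ext_iff_of_nodup hndL hndR).2 hmem
  calc ((List.range t.length).filter (pvSel t visited)).map (fun j => t.getD j ' ')
      = PySem.List.sorted (keys.filter (fun c => !decide (cnt.getD c 0 = 0))) (fun c => c) false :=
        (PySem.List.sorted_eq_of_perm_of_pairwise_lt
          (keys.filter (fun c => !decide (cnt.getD c 0 = 0)))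
          (((List.range t.length).filter (pvSel t visited)).map (fun j => t.getD j ' '))
          (fun c => c) hperm hLp).symm
    _ = keys.filter (fun c => !decide (cnt.getD c 0 = 0)) :=
        PySem.List.sorted_eq_of_perm_of_pairwise_lt _ _ (fun c => c) (List.Perm.refl _) hRp

lemma pvOk_set (t : List Char) (visited : List Int) (hs : t.Pairwise (· ≤ ·))
    (hok : pvOk t visited) (hlen : visited.length = t.length) {j : Nat} (hj : j < t.length)
    (hsel : pvSel t visited j = true) : pvOk t (visited.set j 1) := by
  have hjv : j < visited.length := by omega
  have hch := (pvSel_char t visited hs hok hj).1 hsel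
  intro i h1 hcc hne
  rw [pvGetD_set visited j _ hjv] at hne ⊢
  by_cases hij : i = j
  · simp [hij]
  · rw [if_neg hij]
    by_cases h2 : i + 1 = j
    · apply hch.2 i (by omega)
      rw [← h2]
      exact hcc.symm
    · rw [if_neg h2] at hne
      exact hok i h1 hcc hne

lemma pvRem_set (t : List Char) (visited : List Int) (hs : t.Pairwise (· ≤ ·))
    (hok : pvOk t visited) (hlen : visited.length = t.length) {j : Nat} (hj : j < t.length)
    (hsel : pvSel t visited j = true) (c : Char) :
    (pvRem t (visited.set j 1) c : Int) =
      if c = t.getD j ' ' then (pvRem t visited c : Int) - 1 else (pvRem t visited c : Int) := by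
  have hjv : j < visited.length := by omega
  have hch := (pvSel_char t visited hs hok hj).1 hsel
  by_cases hc : c = t.getD j ' '
  · rw [if_pos hc]
    have hpoint : (List.range t.length).countP
          (fun i => decide (t.getD i ' ' = c) && decide (visited.getD i 0 = 0)) =
        (List.range t.length).countP
          (fun i => decide (t.getD i ' ' = c) && decide ((visited.set j 1).getD i 0 = 0)) + 1 := by
      apply pvCountP_point _ _ _ j ?_ hj ?_ ?_
      · intro i hij
        rw [pvGetD_set visited j i hjv, if_neg hij]
      · rw [Bool.and_eq_true, decide_eq_true_eq, decide_eq_true_eq]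
        exact ⟨hc.symm, hch.1⟩
      · rw [pvGetD_set visited j j hjv, if_pos rfl]
        simp
    unfold pvRem
    omega
  · rw [if_neg hc]
    have hcong : (List.range t.length).countP
          (fun i => decide (t.getD i ' ' = c) && decide ((visited.set j 1).getD i 0 = 0)) =
        (List.range t.length).countP
          (fun i => decide (t.getD i ' ' = c) && decide (visited.getD i 0 = 0)) := by
      have hpt : ∀ i, (decide (t.getD i ' ' = c) && decide ((visited.set j 1).getD i 0 = 0)) =
          (decide (t.getD i ' ' = c) && decide (visited.getD i 0 = 0)) := by
        intro i
        rw [pvGetD_set visited j i hjv]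
        by_cases hij : i = j
        · have hne : decide (t.getD i ' ' = c) = false :=
            decide_eq_false (by rw [hij]; exact fun hh => hc hh.symm)
          rw [hne]; simp
        · rw [if_neg hij]
      apply List.countP_congr
      intro i _
      rw [hpt i]
    unfold pvRem
    omega

-- A's DFS equals the counter-indexed DFS
lemma pvMain (t : List Char) (keys : List Char) (n : Nat)
    (hs : t.Pairwise (· ≤ ·)) (hkeys : keys.Pairwise (· < ·))
    (hmemk : ∀ c, c ∈ keys ↔ c ∈ t) (hn : n = t.length) :
    ∀ (fuel : Nat) (visited : List Int) (cnt : PySem.Dict Char Int) (path : List Char) (ans : List String),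
      visited.length = t.length → pvOk t visited →
      (∀ c ∈ keys, cnt.getD c 0 = (pvRem t visited c : Int)) →
      pvDfsA t fuel visited path ans = pvDfsB n keys fuel cnt path ans := by
  subst hn
  intro fuel
  induction fuel with
  | zero => intros; rw [pvDfsA, pvDfsB]
  | succ f ih =>
    intro visited cnt path ans hlen hok hcnt
    rw [pvDfsA, pvDfsB]
    by_cases hb : path.length = t.length
    · rw [if_pos hb, if_pos hb]
    · rw [if_neg hb, if_neg hb]
      rw [pvLoopA_eq_foldl, pvLoopB_eq_foldl]
      rw [← pvKeyEq t visited keys cnt hs hok hkeys hmemk hcnt]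
      rw [List.foldl_map]
      apply PySem.List.foldl_congr_mem
      intro acc j hjmem
      have hmem := List.mem_filter.1 hjmem
      have hj : j < t.length := List.mem_range.1 hmem.1
      have hsel := hmem.2
      apply ih
      · rw [List.length_set]; exact hlen
      · exact pvOk_set t visited hs hok hlen hj hsel
      · intro c hck
        rw [PySem.Dict.getD_insert]
        rw [pvRem_set t visited hs hok hlen hj hsel c]
        by_cases hc : c = t.getD j ' '
        · rw [if_pos hc, if_pos hc, hc, hcnt _ (by rwa [hc] at hck)]
        · rw [if_neg hc, if_neg hc, hcnt _ hck]

-- ----- B side: the breadth-first levels equal the counter-indexed DFS -----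

-- the tree of completions of a prefix, in B's key order
def pvComp (n : Nat) (keys : List Char) (need : PySem.Dict Char Int) (f : Nat) (p : List Char) : List (List Char) :=
  match f with
  | 0 => []
  | f + 1 =>
    if p.length = n then [p]
    else (keys.filter (fun c => ((p.count c : Int)) < need.getD c 0)).flatMap
      (fun c => pvComp n keys need f (p ++ [c]))

-- getD through a fresh-key building fold
lemma pvNeedPres (f : Char → Int) :
    ∀ (ks : List Char) (d : PySem.Dict Char Int) (c : Char), c ∉ ks →
      (ks.foldl (fun d c => d.insert c (f c)) d).getD c 0 = d.getD c 0 := by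
  intro ks
  induction ks with
  | nil => intros; rfl
  | cons k rest ih =>
    intro d c hc
    rw [List.foldl_cons, ih _ c (fun h => hc (List.mem_cons_of_mem _ h)),
      PySem.Dict.getD_insert, if_neg (fun h => hc (by rw [h]; exact List.mem_cons_self))]

lemma pvNeedGetD (f : Char → Int) :
    ∀ (ks : List Char) (d : PySem.Dict Char Int) (c : Char), c ∈ ks → ks.Nodup →
      (ks.foldl (fun d c => d.insert c (f c)) d).getD c 0 = f c := by
  intro ks
  induction ks with
  | nil => intro _ _ h; exact absurd h (List.not_mem_nil)
  | cons k rest ih =>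
    intro d c hc hnd
    rcases List.mem_cons.1 hc with h | h
    · subst h
      rw [List.foldl_cons, pvNeedPres f rest _ c (List.nodup_cons.1 hnd).1,
        PySem.Dict.getD_insert, if_pos rfl]
    · exact ih _ c h (List.nodup_cons.1 hnd).2

lemma pvCountSnoc (p : List Char) (c c' : Char) :
    ((p ++ [c]).count c' : Int) = (p.count c' : Int) + (if c' = c then 1 else 0) := by
  rw [List.count_append, List.count_singleton]
  by_cases h : c' = c
  · subst h
    simp
  · have hne : (c == c') = false := beq_eq_false_iff_ne.2 (fun hh => h hh.symm)
    simp [hne, h]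

-- the counter-indexed DFS appends exactly the completion tree of its path
lemma pvDfsB_eq_comp (n : Nat) (keys : List Char) (need : PySem.Dict Char Int) :
    ∀ (f : Nat) (cnt : PySem.Dict Char Int) (p : List Char) (ans : List String),
      (∀ c ∈ keys, cnt.getD c 0 = need.getD c 0 - p.count c) →
      (∀ c ∈ keys, (p.count c : Int) ≤ need.getD c 0) →
      pvDfsB n keys f cnt p ans = ans ++ (pvComp n keys need f p).map String.ofList := by
  intro f
  induction f with
  | zero => intros; rw [pvDfsB, pvComp]; simp
  | succ f ih =>
    intro cnt p ans hcnt hle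
    rw [pvDfsB, pvComp]
    by_cases hb : p.length = n
    · rw [if_pos hb, if_pos hb]; rfl
    · rw [if_neg hb, if_neg hb]
      rw [pvLoopB_eq_foldl]
      have hfilter : keys.filter (fun c => !decide (cnt.getD c 0 = 0)) =
          keys.filter (fun c => ((p.count c : Int)) < need.getD c 0) := by
        apply List.filter_congr
        intro c hc
        rw [hcnt c hc]
        have := hle c hc
        by_cases h : (p.count c : Int) < need.getD c 0
        · rw [decide_eq_true h, decide_eq_false (by omega : ¬ need.getD c 0 - (p.count c : Int) = 0)]
          rfl
        · rw [decide_eq_false h, decide_eq_true (by omega : need.getD c 0 - (p.count c : Int) = 0)]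
          rfl
      rw [hfilter]
      have hstep : ∀ (acc : List String) (c : Char),
          c ∈ keys.filter (fun c => ((p.count c : Int)) < need.getD c 0) →
          pvDfsB n keys f (cnt.insert c (cnt.getD c 0 - 1)) (p ++ [c]) acc =
            acc ++ (pvComp n keys need f (p ++ [c])).map String.ofList := by
        intro acc c hcf
        have hcf' := List.mem_filter.1 hcf
        have hck := hcf'.1
        have hlt : (p.count c : Int) < need.getD c 0 := by
          have := hcf'.2; simpa using this
        apply ih
        · intro c' hc'
          rw [PySem.Dict.getD_insert, pvCountSnoc, hcnt c' hc']
          by_cases h : c' = c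
          · subst h
            rw [if_pos rfl, if_pos rfl, hcnt c' hc']
            ring
          · rw [if_neg h, if_neg h]
            ring
        · intro c' hc'
          rw [pvCountSnoc]
          by_cases h : c' = c
          · subst h
            rw [if_pos rfl]
            have := hle c' hc'
            omega
          · rw [if_neg h]
            have := hle c' hc'
            omega
      rw [List.map_flatMap, ← PySem.List.foldl_append_eq_flatMap]
      exact PySem.List.foldl_congr_mem _ _ _ _ hstep

-- every prefix in level m has length m and respects the counts
lemma pvLevelInv (keys : List Char) (need : PySem.Dict Char Int)
    (hpos : ∀ c ∈ keys, 0 ≤ need.getD c 0) :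
    ∀ (m : Nat) (p : List Char),
      p ∈ (List.range m).foldl (fun lv _ => pvStep keys need lv) [[]] →
      p.length = m ∧ ∀ c ∈ keys, (p.count c : Int) ≤ need.getD c 0 := by
  intro m
  induction m with
  | zero =>
    intro p hp
    simp only [List.range_zero, List.foldl_nil, List.mem_singleton] at hp
    subst hp
    refine ⟨rfl, ?_⟩
    intro c hc
    simp only [List.count_nil, Int.natCast_zero]
    exact hpos c hc
  | succ m ih =>
    intro p hp
    rw [List.range_succ, List.foldl_append, List.foldl_cons, List.foldl_nil] at hp
    unfold pvStep at hp
    obtain ⟨q, hq, hmem⟩ := List.mem_flatMap.1 hp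
    obtain ⟨c, hcf, hpc⟩ := List.mem_map.1 hmem
    obtain ⟨hqlen, hqle⟩ := ih q hq
    have hcf' := List.mem_filter.1 hcf
    subst hpc
    constructor
    · rw [List.length_append, hqlen, List.length_singleton]
    · intro c' hc'
      have hq' := hqle c' hc'
      rw [pvCountSnoc]
      by_cases h : c' = c
      · subst h
        rw [if_pos rfl]
        have : (q.count c' : Int) < need.getD c' 0 := by
          have := hcf'.2; simpa using this
        omega
      · rw [if_neg h]
        omega

-- folding one more level just deepens the completion trees by one step
lemma pvLevels (n : Nat) (keys : List Char) (need : PySem.Dict Char Int)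
    (hpos : ∀ c ∈ keys, 0 ≤ need.getD c 0) :
    ∀ m, m ≤ n →
      ((List.range m).foldl (fun lv _ => pvStep keys need lv) [[]]).flatMap
          (pvComp n keys need (n - m + 1)) =
        pvComp n keys need (n + 1) [] := by
  intro m
  induction m with
  | zero =>
    intro _
    simp only [List.range_zero, List.foldl_nil, Nat.sub_zero]
    simp
  | succ m ih =>
    intro hle
    have hm : m ≤ n := by omega
    rw [List.range_succ, List.foldl_append, List.foldl_cons, List.foldl_nil]
    unfold pvStep
    rw [List.flatMap_assoc, ← ih hm]
    apply List.flatMap_congr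
    intro p hp
    obtain ⟨hplen, hple⟩ := pvLevelInv keys need hpos m p hp
    rw [List.flatMap_map]
    have hne : ¬ p.length = n := by omega
    have harith : n - m + 1 = (n - (m + 1) + 1) + 1 := by omega
    rw [harith, pvComp, if_neg hne]

-- the full completion tree of the empty prefix is exactly B's final level
lemma pvCompLevels (n : Nat) (keys : List Char) (need : PySem.Dict Char Int)
    (hpos : ∀ c ∈ keys, 0 ≤ need.getD c 0) :
    pvComp n keys need (n + 1) [] =
      (List.range n).foldl (fun lv _ => pvStep keys need lv) [[]] := by
  rw [← pvLevels n keys need hpos n le_rfl]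
  have hone : n - n + 1 = 0 + 1 := by omega
  rw [hone]
  have hsing : ∀ p ∈ (List.range n).foldl (fun lv _ => pvStep keys need lv) [[]],
      pvComp n keys need (0 + 1) p = [p] := by
    intro p hp
    have hplen := (pvLevelInv keys need hpos n p hp).1
    rw [pvComp, if_pos hplen]
  rw [List.flatMap_congr hsing, List.flatMap_singleton']

-- ===== VERDICT (by name: the statement is the Claim_ definition above) =====
theorem permutation1_spec : Claim_equal_permutation1 := by
  intro s _
  unfold Spec_permutation1
  simp only [permutation1, permutation1_alt]
  have hrep : ∀ (m k : Nat), (List.replicate m (0 : Int)).getD k 0 = 0 := by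
    intro m k
    rw [List.getD_eq_getElem?_getD, List.getElem?_replicate]
    split <;> simp
  set t := PySem.List.sorted s.toList (fun c => c) false with ht
  set keys := PySem.List.sorted (PySem.Set.ofList s.toList) (fun c => c) false with hk
  set need := keys.foldl (fun d c => d.insert c ((s.toList.count c : Int))) PySem.Dict.empty with hneed
  have hkeysp : keys.Pairwise (· < ·) := PySem.List.sorted_ofList_pairwise_lt s.toList
  have hkeysnd : keys.Nodup := hkeysp.imp ne_of_lt
  have hneedc : ∀ c ∈ keys, need.getD c 0 = (s.toList.count c : Int) := by
    intro c hc
    exact pvNeedGetD (fun c => (s.toList.count c : Int)) keys PySem.Dict.empty c hc hkeysnd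
  have hpos : ∀ c ∈ keys, 0 ≤ need.getD c 0 := by
    intro c hc
    rw [hneedc c hc]
    exact Int.natCast_nonneg _
  have hlen' : t.length = s.toList.length := PySem.List.length_sorted ..
  have hA : pvDfsA t (t.length + 1) (List.replicate s.toList.length 0) [] [] =
      pvDfsB s.toList.length keys (t.length + 1) (PySem.Dict.counter s.toList) [] [] := by
    apply pvMain
    · exact PySem.List.sorted_pairwise s.toList (fun c => c)
    · exact hkeysp
    · intro c
      rw [hk, ht, PySem.List.mem_sorted, PySem.Set.mem_ofList, PySem.List.mem_sorted]
    · omega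
    · simp [hlen']
    · intro i h1 h2 h3
      exact absurd (hrep _ _) h3
    · intro c _
      rw [PySem.Dict.getD_counter]
      have hmap : (List.range t.length).map (fun j => t.getD j ' ') = t := by
        apply List.ext_getElem
        · simp
        · intro i hi1 hi2
          simp only [List.getElem_map, List.getElem_range]
          rw [List.getD_eq_getElem?_getD, List.getElem?_eq_getElem (by simpa using hi1)]
          rfl
      have hremv : pvRem t (List.replicate s.toList.length 0) c = s.toList.count c := by
        unfold pvRem
        have h1 : (List.range t.length).countP
              (fun j => decide (t.getD j ' ' = c) && decide ((List.replicate s.toList.length (0:Int)).getD j 0 = 0)) =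
            (List.range t.length).countP (fun j => decide (t.getD j ' ' = c)) := by
          apply List.countP_congr
          intro a _
          rw [show ∀ b : Bool, (b && decide ((List.replicate s.toList.length (0:Int)).getD a 0 = 0)) = b by
            intro b; rw [decide_eq_true (hrep s.toList.length a)]; simp]
        rw [h1]
        have h2 : (List.range t.length).countP (fun j => decide (t.getD j ' ' = c)) =
            ((List.range t.length).map (fun j => t.getD j ' ')).countP (fun x => decide (x = c)) := by
          rw [List.countP_map]; rfl
        rw [h2, hmap]
        have h3 : t.countP (fun x => decide (x = c)) = t.count c := by
          rw [List.count_eq_countP]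
          apply List.countP_congr
          intro a _
          simp only [beq_iff_eq, decide_eq_true_eq]
        rw [h3]
        exact (PySem.List.sorted_perm s.toList (fun c => c) false).count_eq c
      rw [hremv]
  have hB : pvDfsB s.toList.length keys (t.length + 1) (PySem.Dict.counter s.toList) [] [] =
      [] ++ (pvComp s.toList.length keys need (t.length + 1) []).map String.ofList := by
    apply pvDfsB_eq_comp
    · intro c hc
      rw [PySem.Dict.getD_counter, hneedc c hc]
      simp
    · intro c hc
      rw [hneedc c hc]
      simp
  rw [hA, hB, hlen', pvCompLevels s.toList.length keys need hpos]
  simp
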